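-- pv_equiv track=rewrite | github.com/xieyaqi188/fulfillment_delay | secretary_problem/policy.py | offline
-- ===== SOURCE A (Python) =====
-- def offline(val, inv_num, sample):
--     """
--     Offline Policy (Hindsight Benchmark)
--     :return: total valuation by offline policy
--     """
--     total_val = 0
--     hind_demand = [0] * len(val)
--     for s in sample:
--         hind_demand[val.index(s)] += 1
--
--     for index in range(len(val)-1, -1, -1):
--         if hind_demand[index] <= inv_num:
--             total_val += hind_demand[index] * val[index]
--             inv_num -= hind_demand[index]
--         else:
--             total_val += inv_num * val[index]
--             inv_num = 0
--     return total_val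
-- ===== SOURCE B (Python) =====
-- def offline(val, inv_num, sample):
--     """
--     Offline Policy (Hindsight Benchmark), table-plus-selection form.
--     :return: total valuation by offline policy
--     """
--     n = len(val)
--     hind_demand = [0] * n
--     for s in sample:
--         hind_demand[val.index(s)] += 1
--
--     # cum[i] = total demand at indices i..n-1 (suffix-cumulative table)
--     cum = [0] * (n + 1)
--     for i in range(n - 1, -1, -1):
--         cum[i] = cum[i + 1] + hind_demand[i]
--
--     # take full demand above the cutoff, one partial term at the cutoff
--     total_val = 0
--     i = n - 1
--     while i >= 0 and cum[i] <= inv_num: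
--         total_val += hind_demand[i] * val[i]
--         i -= 1
--     if i >= 0:
--         total_val += (inv_num - cum[i + 1]) * val[i]
--     return total_val
-- ===== Notes on version B (the rewrite author's own statement) =====
-- stated objective: alternative
-- what changed: The running-capacity reverse loop (decrement remaining inventory with a branch) is replaced by a suffix-cumulative demand table plus a separate selection pass that takes full demand above the cutoff index and one partial term at it; the demand-counting first pass is kept.
import Mathlib
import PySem

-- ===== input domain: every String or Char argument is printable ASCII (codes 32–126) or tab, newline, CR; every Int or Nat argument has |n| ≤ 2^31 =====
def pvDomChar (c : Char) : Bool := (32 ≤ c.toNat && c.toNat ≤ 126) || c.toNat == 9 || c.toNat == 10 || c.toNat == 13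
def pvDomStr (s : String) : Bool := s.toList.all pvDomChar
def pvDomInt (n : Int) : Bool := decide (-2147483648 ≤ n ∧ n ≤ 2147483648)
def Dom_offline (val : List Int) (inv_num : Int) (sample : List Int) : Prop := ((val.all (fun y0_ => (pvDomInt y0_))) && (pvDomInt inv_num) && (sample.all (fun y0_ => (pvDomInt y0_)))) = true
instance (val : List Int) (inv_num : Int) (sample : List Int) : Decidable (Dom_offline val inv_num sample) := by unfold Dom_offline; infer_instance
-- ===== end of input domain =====

-- B replaces A's running-capacity scan by a suffix-cumulative demand table plus a separate
-- selection pass (full terms above the cutoff, one partial term at it); same cost, different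
-- decomposition (objective: alternative).

-- ===== PORT A =====

-- first pass of A (and, literally identically, of B): hind_demand[val.index(s)] += 1.
-- val.index raises ValueError when s ∉ val (index? = none); Pre_offline excludes that.
def offlineDemand (val : List Int) (sample : List Int) : List Int :=
  sample.foldl
    (fun d s =>
      match PySem.List.index? val s with
      | some i => d.set i (d.getD i 0 + 1)
      | none => d)
    (List.replicate val.length 0)

-- 'for index in range(len(val)-1, -1, -1)' as the obvious structural recursion on the
-- descending index; k+1 means the loop variable index = k.  All indices hit are in range,
-- so List.getD _ _ 0 is exact for Python's hind_demand[index] / val[index].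
def offlineLoop (hind val : List Int) : Nat → Int × Int → Int × Int
  | 0, st => st
  | k+1, st =>
      offlineLoop hind val k
        (if hind.getD k 0 ≤ st.2 then
          (st.1 + hind.getD k 0 * val.getD k 0, st.2 - hind.getD k 0)
         else
          (st.1 + st.2 * val.getD k 0, 0))

def offline (val : List Int) (inv_num : Int) (sample : List Int) : Int :=
  let hind_demand := offlineDemand val sample
  (offlineLoop hind_demand val val.length (0, inv_num)).1

-- ===== PORT B =====

-- 'for i in range(n-1, -1, -1): cum[i] = cum[i+1] + hind_demand[i]' (descending index recursion)
def offlineCum (hind : List Int) : Nat → List Int → List Int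
  | 0, c => c
  | k+1, c => offlineCum hind k (c.set k (c.getD (k+1) 0 + hind.getD k 0))

-- the while loop ('while i >= 0 and cum[i] <= inv_num') plus the final partial term;
-- k+1 means i = k, k = 0 means i = -1 (loop ran off the front).
def offlineSelect (val hind cum : List Int) (inv_num : Int) : Nat → Int → Int
  | 0, total => total
  | k+1, total =>
      if cum.getD k 0 ≤ inv_num then
        offlineSelect val hind cum inv_num k (total + hind.getD k 0 * val.getD k 0)
      else
        total + (inv_num - cum.getD (k+1) 0) * val.getD k 0

def offline_alt (val : List Int) (inv_num : Int) (sample : List Int) : Int :=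
  let n := val.length
  let hind_demand := offlineDemand val sample
  let cum := offlineCum hind_demand n (List.replicate (n+1) 0)
  offlineSelect val hind_demand cum inv_num n 0

-- ===== PRECONDITION & SPEC =====
-- Pre_ excludes exactly the inputs where a sample element is absent from val:
-- there val.index(s) raises ValueError in A (and a KeyError-free B raises the same way).
def Pre_offline (val : List Int) (_inv_num : Int) (sample : List Int) : Prop :=
  ∀ s ∈ sample, s ∈ val
instance (val : List Int) (inv_num : Int) (sample : List Int) : Decidable (Pre_offline val inv_num sample) := by unfold Pre_offline; infer_instance

def pvWitness_offline : List Int × Int × List Int := ([3, 1, 2], 2, [2, 1, 2])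

def Spec_offline (val : List Int) (inv_num : Int) (sample : List Int) (out : Int) : Prop := out = offline_alt val inv_num sample
instance (val : List Int) (inv_num : Int) (sample : List Int) (out : Int) : Decidable (Spec_offline val inv_num sample out) := by unfold Spec_offline; infer_instance

-- ===== CLAIM (what is proved, stated in full; the proofs are below) =====
def Claim_equal_offline : Prop := ∀ (val : List Int) (inv_num : Int) (sample : List Int), Dom_offline val inv_num sample → Pre_offline val inv_num sample → Spec_offline val inv_num sample (offline val inv_num sample)

-- ===== LEMMAS AND PROOFS =====

-- demand entries are nonnegative
lemma demand_mem_nonneg (val sample : List Int) :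
    ∀ x ∈ offlineDemand val sample, 0 ≤ x := by
  unfold offlineDemand
  suffices h : ∀ (d : List Int), (∀ x ∈ d, 0 ≤ x) →
      ∀ x ∈ sample.foldl
        (fun d s =>
          match PySem.List.index? val s with
          | some i => d.set i (d.getD i 0 + 1)
          | none => d) d, 0 ≤ x by
    exact h _ (by intro x hx; simp [List.eq_of_mem_replicate hx])
  induction sample with
  | nil => intro d hd; simpa using hd
  | cons s rest ih =>
      intro d hd
      simp only [List.foldl_cons]
      apply ih
      cases hidx : PySem.List.index? val s with
      | none => simpa using hd
      | some i =>
          simp only [hidx]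
          intro x hx
          rcases List.mem_or_eq_of_mem_set hx with h | h
          · exact hd x h
          · subst h
            have : 0 ≤ d.getD i 0 := by
              simp only [List.getD_eq_getElem?_getD]
              cases hg : d[i]? with
              | none => simp
              | some y => simpa using hd y (List.mem_of_getElem? hg)
            omega

lemma demand_getD_nonneg (val sample : List Int) (i : Nat) :
    0 ≤ (offlineDemand val sample).getD i 0 := by
  simp only [List.getD_eq_getElem?_getD]
  cases hg : (offlineDemand val sample)[i]? with
  | none => simp
  | some y => simpa using demand_mem_nonneg val sample y (List.mem_of_getElem? hg)

-- once inventory is exactly 0, A's loop adds nothing (demands are nonnegative)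
lemma offlineLoop_zero (hind val : List Int)
    (hpos : ∀ i, 0 ≤ hind.getD i 0) :
    ∀ k t, offlineLoop hind val k (t, 0) = (t, 0) := by
  intro k
  induction k with
  | zero => intro t; rfl
  | succ k ih =>
      intro t
      have h := hpos k
      simp only [offlineLoop]
      by_cases hc : hind.getD k 0 ≤ (0 : Int)
      · have h0 : hind.getD k 0 = 0 := le_antisymm hc h
        rw [if_pos hc, h0]
        simpa using ih t
      · rw [if_neg hc]
        simpa using ih t

-- characterisation of the cum table built by offlineCum
lemma getD_set_self (l : List Int) (n : Nat) (a : Int) (h : n < l.length) :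
    (l.set n a).getD n 0 = a := by
  rw [List.getD_eq_getElem?_getD, List.getElem?_set_self (by simpa using h)]; rfl

lemma getD_set_ne (l : List Int) (n m : Nat) (a : Int) (h : n ≠ m) :
    (l.set n a).getD m 0 = l.getD m 0 := by
  rw [List.getD_eq_getElem?_getD, List.getElem?_set_ne h, ← List.getD_eq_getElem?_getD]

-- characterisation of the cum table built by offlineCum
lemma offlineCum_spec (hind : List Int) (n : Nat) :
    ∀ k, k ≤ n → ∀ (c0 : List Int), c0.length = n + 1 →
      (offlineCum hind k c0).length = n + 1 ∧
      (∀ i, k ≤ i → (offlineCum hind k c0).getD i 0 = c0.getD i 0) ∧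
      (∀ i, i < k → (offlineCum hind k c0).getD i 0
          = (offlineCum hind k c0).getD (i+1) 0 + hind.getD i 0) := by
  intro k
  induction k with
  | zero =>
      intro _ c0 hlen
      exact ⟨hlen, fun i _ => rfl, fun i h => absurd h (by omega)⟩
  | succ k ih =>
      intro hkn c0 hlen
      simp only [offlineCum]
      have hset : (c0.set k (c0.getD (k+1) 0 + hind.getD k 0)).length = n + 1 := by
        simp [hlen]
      obtain ⟨h1, h2, h3⟩ := ih (by omega) _ hset
      refine ⟨h1, ?_, ?_⟩
      · intro i hi
        rw [h2 i (by omega), getD_set_ne _ _ _ _ (by omega)]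
      · intro i hi
        by_cases hik : i < k
        · exact h3 i hik
        · have hik' : i = k := by omega
          subst hik'
          rw [h2 i (by omega), h2 (i+1) (by omega),
            getD_set_self _ _ _ (by omega), getD_set_ne _ _ _ _ (by omega)]

-- main invariant: with the A-state's inventory = inv - cum[k], the two loops agree
lemma main_inv (val hind cum : List Int) (inv : Int) (n : Nat)
    (hpos : ∀ i, 0 ≤ hind.getD i 0)
    (hrec : ∀ i, i < n → cum.getD i 0 = cum.getD (i+1) 0 + hind.getD i 0) :
    ∀ k, k ≤ n → ∀ t,
      (offlineLoop hind val k (t, inv - cum.getD k 0)).1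
        = offlineSelect val hind cum inv k t := by
  intro k
  induction k with
  | zero => intro _ t; rfl
  | succ k ih =>
      intro hkn t
      have hrk := hrec k (by omega)
      by_cases hc : cum.getD k 0 ≤ inv
      · have hc' : hind.getD k 0 ≤ inv - cum.getD (k+1) 0 := by omega
        have harith : inv - cum.getD (k+1) 0 - hind.getD k 0 = inv - cum.getD k 0 := by omega
        simp only [offlineLoop, offlineSelect, if_pos hc, if_pos hc', harith]
        exact ih (by omega) _
      · have hc' : ¬ hind.getD k 0 ≤ inv - cum.getD (k+1) 0 := by omega
        simp only [offlineLoop, offlineSelect, if_neg hc, if_neg hc']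
        rw [offlineLoop_zero hind val hpos]

-- ===== VERDICT (by name: the statement is the Claim_ definition above) =====
theorem offline_spec : Claim_equal_offline := by
  intro val inv_num sample _ _
  unfold Spec_offline offline offline_alt
  set n := val.length with hn
  set hind := offlineDemand val sample with hhind
  set cum := offlineCum hind n (List.replicate (n+1) 0) with hcum
  obtain ⟨hlen, htop, hrec⟩ :=
    offlineCum_spec hind n n (le_refl n) (List.replicate (n+1) 0) (by simp)
  have hpos : ∀ i, 0 ≤ hind.getD i 0 := fun i => demand_getD_nonneg val sample i
  have hzero : cum.getD n 0 = 0 := by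
    rw [← hcum] at htop
    rw [htop n (le_refl n)]
    simp [List.getD_eq_getElem?_getD]
  have := main_inv val hind cum inv_num n hpos (by intro i hi; exact hrec i hi) n (le_refl n) 0
  rw [← this, hzero]
  norm_num
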